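-- pv_equiv track=rewrite | github.com/MrHamdulay/csc3-capstone | examples/data/Assignment_9/tmxtha006/question2.py | write_line
-- ===== SOURCE A (Python) =====
-- def write_line(array,width,ans="", line=""):
--     """this function returns the formatted data of the file read in one string"""
--     if len(array):
--         l=len(line)+len(array[0])
--         if not array:
--             ans+="\n"+line
--         elif bool(l<width)==True:
--             line+=" "+array[0]
--             del array[0]
--             return   write_line(array,width,ans,line)
--         elif l>=width and array:
--             ans+="\n"+line
--             return write_line(array,width,ans, line="")
--         else:
--             ans+="\n"+line
--     ans+="\n"+line
--     return ans
-- ===== SOURCE B (Python) =====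
-- def write_line(array, width, ans="", line=""):
--     """Pack words into a list of lines in one pass, then join; clears array like A."""
--     parts = [ans]
--     cur = line
--     for w in array:
--         if len(cur) + len(w) >= width:
--             parts.append(cur)
--             cur = ""
--         cur += " " + w
--     parts.append(cur)
--     array.clear()
--     return "\n".join(parts)
-- ===== Notes on version B (the rewrite author's own statement) =====
-- stated objective: simpler
-- what changed: Replaces A's four-branch tail recursion (which retries a word after each line flush) by a single iterative pass that consumes each word exactly once, accumulating a list of lines joined at the end.
import Mathlib
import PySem

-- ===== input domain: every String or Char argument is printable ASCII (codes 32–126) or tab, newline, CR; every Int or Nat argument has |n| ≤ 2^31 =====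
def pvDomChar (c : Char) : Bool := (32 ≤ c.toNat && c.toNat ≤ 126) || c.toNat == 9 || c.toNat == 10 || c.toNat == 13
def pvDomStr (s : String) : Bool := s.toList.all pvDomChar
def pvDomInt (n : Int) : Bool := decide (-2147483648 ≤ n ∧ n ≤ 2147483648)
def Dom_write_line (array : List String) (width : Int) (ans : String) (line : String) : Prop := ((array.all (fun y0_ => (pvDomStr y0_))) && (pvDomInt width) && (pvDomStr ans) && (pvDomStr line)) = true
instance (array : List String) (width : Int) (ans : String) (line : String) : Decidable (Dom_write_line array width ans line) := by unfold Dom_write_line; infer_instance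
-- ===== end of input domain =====

-- B replaces A's word-retrying tail recursion by a single pass that consumes each word once,
-- building a list of lines joined at the end (objective: simpler); return-value equivalence only:
-- in Python both A and B empty the input list in place.

-- ===== PORT A =====
-- literal transliteration of A's tail recursion; fuel only makes the recursion total
-- (under Pre_ the recursion finishes before fuel runs out; the fuel-0 value is A's base-case value)
def write_line_go : Nat → List String → Int → String → String → String
  | 0, _, _, ans, line => ans ++ "\n" ++ line
  | fuel+1, array, width, ans, line =>
    if (PySem.List.len array ≠ 0) then
      match array with
      | [] => ans ++ "\n" ++ line            -- Python's dead 'if not array' branch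
      | w :: rest =>
        let l : Int := PySem.Str.len line + PySem.Str.len w
        if (decide (l < width)) == true then
          write_line_go fuel rest width ans (line ++ " " ++ w)
        else if l ≥ width ∧ array ≠ [] then
          write_line_go fuel (w :: rest) width (ans ++ "\n" ++ line) ""
        else
          ((ans ++ "\n" ++ line) ++ "\n" ++ line)   -- Python's dead 'else' branch + fallthrough append
    else
      ans ++ "\n" ++ line

def write_line (array : List String) (width : Int) (ans : String) (line : String) : String :=
  write_line_go (2 * array.length + 1) array width ans line

-- ===== PORT B =====
-- hand port of "\n".join
def joinNL : List String → String
  | [] => ""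
  | [s] => s
  | s :: rest => s ++ "\n" ++ joinNL rest

-- the for-loop of Source B: one structural pass over the words, accumulating (parts, cur)
def write_line_pack : List String → Int → List String → String → List String
  | [], _, parts, cur => parts ++ [cur]
  | w :: rest, width, parts, cur =>
    let st := if PySem.Str.len cur + PySem.Str.len w ≥ width then (parts ++ [cur], "") else (parts, cur)
    write_line_pack rest width st.1 (st.2 ++ " " ++ w)

def write_line_alt (array : List String) (width : Int) (ans : String) (line : String) : String :=
  joinNL (write_line_pack array width [ans] line)

-- ===== PRECONDITION & SPEC =====
-- Pre_ excludes exactly the inputs on which Python A never returns a value: a word of length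
-- ≥ width makes A recurse forever (flush then retry the same word), so A returns nothing there.
def Pre_write_line (array : List String) (width : Int) (ans : String) (line : String) : Prop :=
  ∀ w ∈ array, PySem.Str.len w < width
instance (array : List String) (width : Int) (ans : String) (line : String) : Decidable (Pre_write_line array width ans line) := by unfold Pre_write_line; infer_instance

def pvWitness_write_line : List String × Int × String × String := (["wrap", "me", "now"], 8, "", "")

def Spec_write_line (array : List String) (width : Int) (ans : String) (line : String) (out : String) : Prop := out = write_line_alt array width ans line
instance (array : List String) (width : Int) (ans : String) (line : String) (out : String) : Decidable (Spec_write_line array width ans line out) := by unfold Spec_write_line; infer_instance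

-- ===== CLAIM (what is proved, stated in full; the proofs are below) =====
def Claim_equal_write_line : Prop := ∀ (array : List String) (width : Int) (ans : String) (line : String), Dom_write_line array width ans line → Pre_write_line array width ans line → Spec_write_line array width ans line (write_line array width ans line)

-- ===== LEMMAS AND PROOFS =====
theorem pack_accum (arr : List String) : ∀ (width : Int) (p q : List String) (cur : String),
    write_line_pack arr width (p ++ q) cur = p ++ write_line_pack arr width q cur := by
  induction arr with
  | nil => intro width p q cur; simp [write_line_pack]
  | cons w rest ih =>
    intro width p q cur
    simp only [write_line_pack]
    split_ifs <;> simp [ih, List.append_assoc]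

theorem joinNL_merge (a b : String) (t : List String) :
    joinNL ((a ++ "\n" ++ b) :: t) = joinNL (a :: b :: t) := by
  cases t <;> simp [joinNL, String.append_assoc]

-- main invariant: A's fueled recursion computes B's joined line list whenever every word fits
theorem go_eq_pack : ∀ (arr : List String) (width : Int), (∀ w ∈ arr, PySem.Str.len w < width) →
    ∀ (fuel : Nat), 2 * arr.length ≤ fuel → ∀ (ans line : String),
    write_line_go fuel arr width ans line = joinNL (write_line_pack arr width [ans] line) := by
  intro arr
  induction arr with
  | nil =>
    intro width _ fuel _ ans line
    cases fuel <;> simp [write_line_go, write_line_pack, joinNL, PySem.List.len]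
  | cons w rest ih =>
    intro width hpre fuel hfuel ans line
    have hw : PySem.Str.len w < width := hpre w (by simp)
    have hrest : ∀ x ∈ rest, PySem.Str.len x < width := fun x hx => hpre x (by simp [hx])
    obtain ⟨f, rfl⟩ : ∃ f, fuel = f + 1 := ⟨fuel - 1, by simp at hfuel; omega⟩
    simp only [write_line_go, write_line_pack, PySem.List.len]
    rw [if_pos (by simp only [List.length_cons]; omega)]
    by_cases h : PySem.Str.len line + PySem.Str.len w < width
    · -- word fits: both consume it
      have hnot : ¬ PySem.Str.len line + PySem.Str.len w ≥ width := by omega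
      simp only [h, decide_true, BEq.rfl, if_true, if_neg hnot]
      exact ih width hrest f (by simp at hfuel ⊢; omega) ans (line ++ " " ++ w)
    · -- flush: A recurses with empty line and retries w, which then surely fits
      have hge : PySem.Str.len line + PySem.Str.len w ≥ width := by omega
      simp only [h, decide_false, if_pos hge]
      rw [if_neg (by simp)]
      rw [if_pos ⟨hge, by simp⟩]
      obtain ⟨g, rfl⟩ : ∃ g, f = g + 1 := ⟨f - 1, by simp at hfuel; omega⟩
      simp only [write_line_go, PySem.List.len]
      rw [if_pos (by simp only [List.length_cons]; omega)]
      have hfit : PySem.Str.len ("" : String) + PySem.Str.len w < width := by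
        simpa [PySem.Str.len] using hw
      simp only [hfit, decide_true, BEq.rfl, if_true]
      rw [ih width hrest g (by simp at hfuel ⊢; omega) (ans ++ "\n" ++ line) ("" ++ " " ++ w)]
      have e1 : write_line_pack rest width [ans ++ "\n" ++ line] ("" ++ " " ++ w)
          = (ans ++ "\n" ++ line) :: write_line_pack rest width [] ("" ++ " " ++ w) := by
        simpa using pack_accum rest width [ans ++ "\n" ++ line] [] ("" ++ " " ++ w)
      have e2 : write_line_pack rest width ([ans] ++ [line]) ("" ++ " " ++ w)
          = ans :: line :: write_line_pack rest width [] ("" ++ " " ++ w) := by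
        simpa using pack_accum rest width [ans, line] [] ("" ++ " " ++ w)
      rw [e1, e2]
      exact joinNL_merge ans line _

-- ===== VERDICT (by name: the statement is the Claim_ definition above) =====
theorem write_line_spec : Claim_equal_write_line := by
  intro array width ans line _ hpre
  unfold Spec_write_line write_line write_line_alt
  exact go_eq_pack array width hpre _ (by omega) ans line
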